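-- pv_equiv track=rewrite | github.com/davidiach/erdos97 | scripts/analyze_n8_exact_survivors.py | phi_edges
-- ===== SOURCE A (Python) =====
-- N = 8
--
-- def chord(a: int, b: int) -> tuple[int, int]:
--     return (a, b) if a < b else (b, a)
--
-- def witnesses(rows: list[list[int]], i: int) -> list[int]:
--     return [j for j, value in enumerate(rows[i]) if value]
--
-- def phi_edges(rows: list[list[int]]) -> list[tuple[tuple[int, int], tuple[int, int]]]:
--     w = [set(witnesses(rows, i)) for i in range(N)]
--     edges: list[tuple[tuple[int, int], tuple[int, int]]] = []
--     for i in range(N):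
--         for j in range(i + 1, N):
--             inter = sorted(w[i] & w[j])
--             if len(inter) == 2:
--                 edges.append((chord(i, j), chord(inter[0], inter[1])))
--     return edges
-- ===== SOURCE B (Python) =====
-- N = 8
--
-- def phi_edges(rows: list[list[int]]) -> list[tuple[tuple[int, int], tuple[int, int]]]:
--     # Inverted index: instead of intersecting witness sets per pair, walk witness
--     # columns once, group the vertices carrying each column, and distribute the
--     # column to every ordered pair of those vertices; then read off pairs whose
--     # accumulated shared-column list has exactly two entries.
--     cols = 0
--     for r in rows[:N]:
--         cols = max(cols, len(r))
--     shared: dict[tuple[int, int], list[int]] = {}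
--     for c in range(cols):
--         verts = [i for i in range(N) if c < len(rows[i]) and rows[i][c]]
--         rest = verts
--         while rest:
--             u, rest = rest[0], rest[1:]
--             for v in rest:
--                 key = (u, v)
--                 shared[key] = shared.get(key, []) + [c]
--     edges: list[tuple[tuple[int, int], tuple[int, int]]] = []
--     for i in range(N):
--         for j in range(i + 1, N):
--             s = shared.get((i, j), [])
--             if len(s) == 2:
--                 edges.append(((i, j), (s[0], s[1])))
--     return edges
-- ===== Notes on version B (the rewrite author's own statement) =====
-- stated objective: alternative
-- what changed: B replaces the per-pair set intersection (w[i] & w[j], then sort) by an inverted index: it walks witness columns once, groups the vertices carrying each column, distributes the column to every ordered vertex pair in a dictionary, and then reads off the pairs whose accumulated shared-column list has length exactly 2.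
import Mathlib
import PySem

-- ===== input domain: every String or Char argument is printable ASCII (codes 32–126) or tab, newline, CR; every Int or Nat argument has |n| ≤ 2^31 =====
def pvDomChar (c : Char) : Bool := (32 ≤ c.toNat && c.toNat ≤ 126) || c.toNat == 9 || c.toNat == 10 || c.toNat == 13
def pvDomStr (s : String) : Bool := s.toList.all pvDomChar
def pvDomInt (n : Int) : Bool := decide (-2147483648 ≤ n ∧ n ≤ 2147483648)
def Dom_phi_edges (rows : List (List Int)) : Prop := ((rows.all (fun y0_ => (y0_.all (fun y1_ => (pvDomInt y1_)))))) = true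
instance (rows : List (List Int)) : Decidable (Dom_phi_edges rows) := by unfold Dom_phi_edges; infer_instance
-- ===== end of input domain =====

-- B inverts the traversal: instead of intersecting per-pair witness sets, it walks witness
-- columns once, groups the vertices carrying each column, and distributes the column to every
-- ordered pair of them in a dictionary; objective 'alternative' (different data structure).
-- Proved equal on all inputs with at least 8 rows (A raises IndexError otherwise).

-- ===== PORT A =====
def pvChord (a b : Int) : Int × Int := if a < b then (a, b) else (b, a)

-- rows[i]: Python raises IndexError out of range; Pre_ keeps every access in range, the [] default is unreachable there
def pvWitnesses (rows : List (List Int)) (i : Int) : List Int :=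
  ((PySem.List.enumerate ((PySem.List.pyGet? rows i).getD []) 0).filter
    (fun p => p.2 != 0)).map (fun p => p.1)

def phi_edges (rows : List (List Int)) : List ((Int × Int) × (Int × Int)) :=
  let w : List (PySem.Set Int) :=
    (PySem.List.pyRange 0 8 1).map (fun i => PySem.Set.ofList (pvWitnesses rows i))
  (PySem.List.pyRange 0 8 1).foldl (fun edges i =>
    (PySem.List.pyRange (i + 1) 8 1).foldl (fun edges j =>
      let inter := PySem.List.sorted
        (PySem.Set.inter (PySem.List.pyGetD w i []) (PySem.List.pyGetD w j [])) (fun x => x) false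
      if inter.length = 2 then
        edges ++ [(pvChord i j, pvChord (PySem.List.pyGetD inter 0 0) (PySem.List.pyGetD inter 1 0))]
      else edges) edges) []

-- ===== PORT B =====
-- cols = running max of len(r) over rows[:8]
def pvCols (rows : List (List Int)) : Int :=
  (PySem.List.slice rows none (some 8)).foldl (fun acc r => max acc (PySem.List.len r)) 0

-- the comprehension condition 'c < len(rows[i]) and rows[i][c]' (guard keeps the index in range)
def pvCond (rows : List (List Int)) (i c : Int) : Bool :=
  decide (c < PySem.List.len ((PySem.List.pyGet? rows i).getD [])) &&
  (PySem.List.pyGetD ((PySem.List.pyGet? rows i).getD []) c 0 != 0)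

def pvVerts (rows : List (List Int)) (c : Int) : List Int :=
  (PySem.List.pyRange 0 8 1).filter (fun i => pvCond rows i c)

-- the 'while rest: u, rest = rest[0], rest[1:]; for v in rest: …' loop
def pvAddPairs (c : Int) : List Int → PySem.Dict (Int × Int) (List Int) → PySem.Dict (Int × Int) (List Int)
  | [], d => d
  | u :: rest, d =>
      pvAddPairs c rest
        (rest.foldl (fun d v => d.insert (u, v) (d.getD (u, v) [] ++ [c])) d)

def pvShared (rows : List (List Int)) : PySem.Dict (Int × Int) (List Int) :=
  (PySem.List.pyRange 0 (pvCols rows) 1).foldl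
    (fun d c => pvAddPairs c (pvVerts rows c) d) PySem.Dict.empty

def phi_edges_alt (rows : List (List Int)) : List ((Int × Int) × (Int × Int)) :=
  let shared := pvShared rows
  (PySem.List.pyRange 0 8 1).foldl (fun edges i =>
    (PySem.List.pyRange (i + 1) 8 1).foldl (fun edges j =>
      let s := shared.getD (i, j) []
      if s.length = 2 then
        edges ++ [((i, j), (PySem.List.pyGetD s 0 0, PySem.List.pyGetD s 1 0))]
      else edges) edges) []

-- ===== PRECONDITION & SPEC =====
-- A indexes rows[0]..rows[7]; with fewer than 8 rows Python raises IndexError, so those inputs are excluded.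
def Pre_phi_edges (rows : List (List Int)) : Prop := 8 ≤ rows.length
instance (rows : List (List Int)) : Decidable (Pre_phi_edges rows) := by unfold Pre_phi_edges; infer_instance

def pvWitness_phi_edges : List (List Int) := [[1, 1], [1, 1], [], [], [], [], [], []]

def Spec_phi_edges (rows : List (List Int)) (out : List ((Int × Int) × (Int × Int))) : Prop := out = phi_edges_alt rows
instance (rows : List (List Int)) (out : List ((Int × Int) × (Int × Int))) : Decidable (Spec_phi_edges rows out) := by unfold Spec_phi_edges; infer_instance

-- ===== CLAIM (what is proved, stated in full; the proofs are below) =====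
def Claim_equal_phi_edges : Prop := ∀ (rows : List (List Int)), Dom_phi_edges rows → Pre_phi_edges rows → Spec_phi_edges rows (phi_edges rows)

-- ===== LEMMAS AND PROOFS =====

-- membership in a row's witness list
lemma mem_pvWitnessList (xs : List Int) (c : Int) :
    c ∈ ((PySem.List.enumerate xs 0).filter (fun p => p.2 != 0)).map (fun p => p.1) ↔
      ∃ (k : Nat) (h : k < xs.length), c = (k : Int) ∧ xs[k] ≠ 0 := by
  simp only [List.mem_map, List.mem_filter, PySem.List.mem_enumerate_iff]
  constructor
  · rintro ⟨p, ⟨⟨k, hk, rfl⟩, hne⟩, rfl⟩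
    refine ⟨k, hk, by simp, ?_⟩
    simpa using hne
  · rintro ⟨k, hk, rfl, hne⟩
    exact ⟨((k : Int), xs[k]), ⟨⟨k, hk, by simp⟩, by simpa using hne⟩, rfl⟩

lemma pairwise_lt_pvWitnessList (xs : List Int) :
    (((PySem.List.enumerate xs 0).filter (fun p => p.2 != 0)).map (fun p => p.1)).Pairwise (· < ·) := by
  rw [List.pairwise_map]
  exact List.Pairwise.sublist List.filter_sublist (PySem.List.pairwise_lt_enumerate _ _)

-- the inner 'for v in rest' loop touches only keys with first component u
lemma getD_foldl_insert_pair (c u : Int) (rest : List Int) (hnd : rest.Nodup)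
    (d : PySem.Dict (Int × Int) (List Int)) (i j : Int) :
    (rest.foldl (fun d v => d.insert (u, v) (d.getD (u, v) [] ++ [c])) d).getD (i, j) [] =
      d.getD (i, j) [] ++ (if i = u ∧ j ∈ rest then [c] else []) := by
  induction rest generalizing d with
  | nil => simp
  | cons v t ih =>
    simp only [List.foldl_cons]
    rw [ih (List.nodup_cons.mp hnd).2, PySem.Dict.getD_insert]
    by_cases h1 : i = u ∧ j = v
    · obtain ⟨rfl, rfl⟩ := h1
      have hjt : j ∉ t := (List.nodup_cons.mp hnd).1
      rw [if_pos rfl, if_neg (fun h => hjt h.2),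
        if_pos ⟨rfl, List.mem_cons.mpr (Or.inl rfl)⟩]
      simp
    · have hne : ¬ ((i, j) = (u, v)) := fun h => h1 (Prod.mk.inj h)
      rw [if_neg hne]
      by_cases h2 : i = u ∧ j ∈ t
      · rw [if_pos h2, if_pos ⟨h2.1, List.mem_cons.mpr (Or.inr h2.2)⟩]
      · have h3 : ¬ (i = u ∧ j ∈ v :: t) := by
          rintro ⟨rfl, hj⟩
          rcases List.mem_cons.mp hj with rfl | hj
          · exact h1 ⟨rfl, rfl⟩
          · exact h2 ⟨rfl, hj⟩
        rw [if_neg h2, if_neg h3]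

-- the per-column pair distribution: key (i,j) (i<j) collects c iff both i and j carry column c
lemma getD_pvAddPairs (c : Int) (verts : List Int) (hs : verts.Pairwise (· < ·))
    (d : PySem.Dict (Int × Int) (List Int)) (i j : Int) (hij : i < j) :
    (pvAddPairs c verts d).getD (i, j) [] =
      d.getD (i, j) [] ++ (if i ∈ verts ∧ j ∈ verts then [c] else []) := by
  induction verts generalizing d with
  | nil => simp [pvAddPairs]
  | cons u rest ih =>
    have hlt : ∀ x ∈ rest, u < x := (List.pairwise_cons.mp hs).1
    have hrest : rest.Pairwise (· < ·) := (List.pairwise_cons.mp hs).2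
    have hnd : rest.Nodup := hrest.imp (fun h => ne_of_lt h)
    simp only [pvAddPairs]
    rw [ih hrest, getD_foldl_insert_pair c u rest hnd]
    by_cases h1 : i = u ∧ j ∈ rest
    · have hir : ¬ (i ∈ rest ∧ j ∈ rest) := fun h => absurd (hlt i h.1) (h1.1 ▸ lt_irrefl u)
      rw [if_pos h1, if_neg hir,
        if_pos ⟨List.mem_cons.mpr (Or.inl h1.1), List.mem_cons.mpr (Or.inr h1.2)⟩]
      simp
    · rw [if_neg h1]
      by_cases h2 : i ∈ rest ∧ j ∈ rest
      · rw [if_pos h2,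
          if_pos ⟨List.mem_cons.mpr (Or.inr h2.1), List.mem_cons.mpr (Or.inr h2.2)⟩]
        simp
      · have h3 : ¬ (i ∈ u :: rest ∧ j ∈ u :: rest) := by
          rintro ⟨hi, hj⟩
          rcases List.mem_cons.mp hj with rfl | hj'
          · rcases List.mem_cons.mp hi with rfl | hi'
            · exact absurd hij (lt_irrefl i)
            · have := hlt i hi'
              omega
          · rcases List.mem_cons.mp hi with rfl | hi'
            · exact h1 ⟨rfl, hj'⟩
            · exact h2 ⟨hi', hj'⟩
        rw [if_neg h2, if_neg h3]
        simp

lemma mem_pvVerts (rows : List (List Int)) (c i : Int) :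
    i ∈ pvVerts rows c ↔ (0 ≤ i ∧ i < 8) ∧ pvCond rows i c = true := by
  simp [pvVerts, List.mem_filter, PySem.List.mem_pyRange_one]

lemma pairwise_lt_pvVerts (rows : List (List Int)) (c : Int) :
    (pvVerts rows c).Pairwise (· < ·) :=
  List.Pairwise.sublist List.filter_sublist (PySem.List.pairwise_lt_pyRange_one 0 8)

-- the whole column loop: key (i,j) ends with exactly the common columns, in increasing order
lemma getD_foldl_cols (rows : List (List Int)) (cs : List Int)
    (d : PySem.Dict (Int × Int) (List Int)) (i j : Int)
    (hi : 0 ≤ i ∧ i < 8) (hj : 0 ≤ j ∧ j < 8) (hij : i < j) :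
    ((cs.foldl (fun d c => pvAddPairs c (pvVerts rows c) d) d).getD (i, j) []) =
      d.getD (i, j) [] ++ cs.filter (fun c => pvCond rows i c && pvCond rows j c) := by
  induction cs generalizing d with
  | nil => simp
  | cons c t ih =>
    simp only [List.foldl_cons, List.filter_cons]
    rw [ih, getD_pvAddPairs c _ (pairwise_lt_pvVerts rows c) d i j hij]
    by_cases h : pvCond rows i c = true ∧ pvCond rows j c = true
    · have hmemv : i ∈ pvVerts rows c ∧ j ∈ pvVerts rows c := by
        rw [mem_pvVerts, mem_pvVerts]
        exact ⟨⟨hi, h.1⟩, ⟨hj, h.2⟩⟩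
      rw [if_pos hmemv]
      simp [h.1, h.2, List.append_assoc]
    · have hnm : ¬ (i ∈ pvVerts rows c ∧ j ∈ pvVerts rows c) := by
        rw [mem_pvVerts, mem_pvVerts]
        rintro ⟨⟨_, hci⟩, ⟨_, hcj⟩⟩
        exact h ⟨hci, hcj⟩
      have hb : (pvCond rows i c && pvCond rows j c) = false := by
        cases hci : pvCond rows i c <;> cases hcj : pvCond rows j c <;> simp_all
      rw [if_neg hnm]
      simp [hb]

-- every row among the first 8 has length ≤ pvCols
lemma len_le_pvCols (rows : List (List Int)) (hlen : 8 ≤ rows.length) (k : Nat) (hk : k < 8) :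
    (((PySem.List.pyGet? rows (k : Int)).getD []).length : Int) ≤ pvCols rows := by
  have hget : (PySem.List.pyGet? rows (k : Int)).getD [] = rows[k]'(by omega) := by
    rw [PySem.List.pyGet?_natCast]
    simp [List.getElem?_eq_getElem (by omega : k < rows.length)]
  have hmem : rows[k]'(by omega) ∈ PySem.List.slice rows none (some 8) := by
    have hs8 : PySem.List.slice rows none (some (8:Int)) = rows.take ((8:Int)).toNat :=
      PySem.List.slice_to rows (by norm_num)
    rw [hs8]
    have hk' : k < (rows.take (8:Int).toNat).length := by
      simp [List.length_take]
      omega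
    have : (rows.take (8:Int).toNat)[k]'hk' = rows[k]'(by omega) := List.getElem_take
    exact this ▸ List.getElem_mem _
  have := (PySem.List.le_foldl_max_int (PySem.List.slice rows none (some 8))
      (fun r => PySem.List.len r) 0).2 _ hmem
  rw [hget]
  unfold pvCols
  simpa [PySem.List.len_eq] using this

-- sorted set-intersection of two witness lists = the inverted-index accumulation
lemma sorted_inter_eq_shared (rows : List (List Int)) (hlen : 8 ≤ rows.length)
    (k m : Nat) (hk : k < 8) (hm : m < 8) (hkm : k < m) :
    PySem.List.sorted
      (PySem.Set.inter
        (PySem.Set.ofList (pvWitnesses rows (k : Int)))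
        (PySem.Set.ofList (pvWitnesses rows (m : Int))))
      (fun x => x) false =
    (pvShared rows).getD ((k : Int), (m : Int)) [] := by
  have hkm' : ((k : Int)) < (m : Int) := by exact_mod_cast hkm
  rw [pvShared, getD_foldl_cols rows _ _ _ _ ⟨by positivity, by exact_mod_cast hk⟩
      ⟨by positivity, by exact_mod_cast hm⟩ hkm']
  rw [PySem.Dict.getD_empty]
  simp only [List.nil_append]
  -- both sides are strictly increasing lists with the same members
  have target_pw : ((PySem.List.pyRange 0 (pvCols rows) 1).filter
      (fun c => pvCond rows (k : Int) c && pvCond rows (m : Int) c)).Pairwise (· < ·) :=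
    List.Pairwise.sublist List.filter_sublist (PySem.List.pairwise_lt_pyRange_one 0 (pvCols rows))
  have hWnodup : ∀ (i : Int), (pvWitnesses rows i).Nodup := fun i =>
    (pairwise_lt_pvWitnessList _).imp (fun h => ne_of_lt h)
  have memcond : ∀ (i : Nat) (hi : i < 8) (c : Int),
      pvCond rows (i : Int) c = true ∧ 0 ≤ c ↔
        ∃ (q : Nat) (h : q < ((PySem.List.pyGet? rows (i : Int)).getD []).length),
          c = (q : Int) ∧ ((PySem.List.pyGet? rows (i : Int)).getD [])[q] ≠ 0 := by
    intro i hi c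
    constructor
    · rintro ⟨hc, hc0⟩
      simp only [pvCond, Bool.and_eq_true, decide_eq_true_eq, bne_iff_ne, ne_eq,
        PySem.List.len_eq] at hc
      obtain ⟨q, rfl⟩ := Int.eq_ofNat_of_zero_le hc0
      have hq : q < ((PySem.List.pyGet? rows (i : Int)).getD []).length := by exact_mod_cast hc.1
      refine ⟨q, hq, rfl, ?_⟩
      have := hc.2
      rwa [PySem.List.pyGetD_natCast, List.getD_eq_getElem _ _ hq] at this
    · rintro ⟨q, hq, rfl, hne⟩
      refine ⟨?_, by positivity⟩
      simp only [pvCond, Bool.and_eq_true, decide_eq_true_eq, bne_iff_ne, ne_eq,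
        PySem.List.len_eq]
      refine ⟨by exact_mod_cast hq, ?_⟩
      rwa [PySem.List.pyGetD_natCast, List.getD_eq_getElem _ _ hq]
  apply PySem.List.sorted_eq_of_perm_of_pairwise_lt
  · apply List.perm_of_nodup_nodup_toFinset_eq
    · exact target_pw.imp (fun h => ne_of_lt h)
    · exact PySem.Set.nodup_inter (PySem.Set.ofList (pvWitnesses rows (k : Int)))
        (PySem.Set.ofList (pvWitnesses rows (m : Int))) (PySem.Set.nodup_ofList _)
    · ext c
      simp only [List.mem_toFinset, PySem.Set.mem_inter, PySem.Set.mem_ofList,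
        List.mem_filter, PySem.List.mem_pyRange_one]
      unfold pvWitnesses
      rw [mem_pvWitnessList, mem_pvWitnessList]
      constructor
      · rintro ⟨⟨hc0, _⟩, hcond⟩
        simp only [Bool.and_eq_true] at hcond
        exact ⟨((memcond k hk c).mp ⟨hcond.1, hc0⟩),
               ((memcond m hm c).mp ⟨hcond.2, hc0⟩)⟩
      · rintro ⟨⟨q, h1, rfl, hx⟩, hcm⟩
        have hck : pvCond rows (k : Int) (q : Int) = true :=
          ((memcond k hk (q : Int)).mpr ⟨q, h1, rfl, hx⟩).1
        have hcm' : pvCond rows (m : Int) (q : Int) = true := by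
          obtain ⟨q', h2, hq', hy⟩ := hcm
          exact ((memcond m hm (q : Int)).mpr ⟨q', h2, hq', hy⟩).1
        refine ⟨⟨by positivity, ?_⟩, by simp [hck, hcm']⟩
        calc ((q : Int)) < (((PySem.List.pyGet? rows (k : Int)).getD []).length : Int) := by
              exact_mod_cast h1
          _ ≤ pvCols rows := len_le_pvCols rows hlen k hk
  · exact target_pw

lemma shared_pairwise (rows : List (List Int)) (k m : Nat) (hk : k < 8) (hm : m < 8)
    (hkm : ((k : Int)) < (m : Int)) :
    (((pvShared rows).getD ((k : Int), (m : Int)) []) : List Int).Pairwise (· < ·) := by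
  rw [pvShared, getD_foldl_cols rows _ _ _ _ ⟨by positivity, by exact_mod_cast hk⟩
      ⟨by positivity, by exact_mod_cast hm⟩ hkm]
  rw [PySem.Dict.getD_empty, List.nil_append]
  exact List.Pairwise.sublist List.filter_sublist (PySem.List.pairwise_lt_pyRange_one 0 (pvCols rows))

lemma pvChord_of_pairwise (l : List Int) (hp : l.Pairwise (· < ·)) (h2 : l.length = 2) :
    pvChord (PySem.List.pyGetD l 0 0) (PySem.List.pyGetD l 1 0) =
      (PySem.List.pyGetD l 0 0, PySem.List.pyGetD l 1 0) := by
  rcases l with _ | ⟨a, _ | ⟨b, _ | ⟨x, t⟩⟩⟩ <;> simp at h2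
  have hab : a < b := by
    simpa using hp
  simp [pvChord, PySem.List.pyGetD, hab]

-- ===== VERDICT (by name: the statement is the Claim_ definition above) =====
theorem phi_edges_spec : Claim_equal_phi_edges := by
  intro rows _ hpre
  show phi_edges rows = phi_edges_alt rows
  unfold phi_edges phi_edges_alt
  apply PySem.List.foldl_congr_mem
  intro acc i hi
  apply PySem.List.foldl_congr_mem
  intro acc' j hj
  rw [PySem.List.mem_pyRange_one] at hi hj
  obtain ⟨k, rfl⟩ := Int.eq_ofNat_of_zero_le hi.1
  obtain ⟨m, rfl⟩ := Int.eq_ofNat_of_zero_le (by omega : (0:Int) ≤ j)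
  have hgi : PySem.List.pyGetD ((PySem.List.pyRange 0 8 1).map
      (fun i => PySem.Set.ofList (pvWitnesses rows i))) (k : Int) [] =
      PySem.Set.ofList (pvWitnesses rows (k : Int)) := by
    exact_mod_cast PySem.List.pyGetD_map_pyRange _ 8 k [] (by exact_mod_cast hi.2)
  have hgj : PySem.List.pyGetD ((PySem.List.pyRange 0 8 1).map
      (fun i => PySem.Set.ofList (pvWitnesses rows i))) (m : Int) [] =
      PySem.Set.ofList (pvWitnesses rows (m : Int)) := by
    exact_mod_cast PySem.List.pyGetD_map_pyRange _ 8 m [] (by exact_mod_cast hj.2)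
  simp only [hgi, hgj]
  have hk8 : k < 8 := by exact_mod_cast hi.2
  have hm8 : m < 8 := by exact_mod_cast hj.2
  have hkm : k < m := by exact_mod_cast (by omega : ((k : Int)) < (m : Int))
  rw [sorted_inter_eq_shared rows hpre k m hk8 hm8 hkm]
  have hkm' : ((k : Int)) < (m : Int) := by exact_mod_cast hkm
  have hchord : pvChord (k : Int) (m : Int) = ((k : Int), (m : Int)) := by
    simp [pvChord, hkm']
  rw [hchord]
  split_ifs with hlen2
  · rw [pvChord_of_pairwise _ (shared_pairwise rows k m hk8 hm8 hkm') hlen2]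
  · rfl
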